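-- pv_equiv track=rewrite | github.com/xbello/snpator | table_parser.py | dict_into_table
-- ===== SOURCE A (Python) =====
-- from collections import OrderedDict
--
-- def dict_into_table(genotypes):
--     """Return a list with lines TAB splitted with the genotypes."""
--     header = "\t" + "\t".join(genotypes.keys())
--
--     lines = [header]
--
--     individuals = OrderedDict()
--
--     for rs, genotype in genotypes.items():
--         for individual in genotype.keys():
--             individuals.setdefault(individual, [])
--             individuals[individual].append(genotype[individual])
--
--     for individual, genotypes in individuals.items():
--         lines.append("\t".join([individual, "\t".join(genotypes)]))
--
--     return lines
-- ===== SOURCE B (Python) =====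
-- def dict_into_table(genotypes):
--     """Return a list with lines TAB splitted with the genotypes."""
--     individuals = list(dict.fromkeys(
--         ind for genotype in genotypes.values() for ind in genotype))
--     lines = ["\t" + "\t".join(genotypes)]
--     for ind in individuals:
--         row = [g[ind] for g in genotypes.values() if ind in g]
--         lines.append("\t".join([ind] + row))
--     return lines
-- ===== Notes on version B (the rewrite author's own statement) =====
-- stated objective: alternative
-- what changed: Replaced A's single accumulation pass that builds an OrderedDict of per-individual value lists via setdefault+append with an index-then-rescan transpose: first compute the first-appearance individual order with dict.fromkeys over all inner keys, then build each row by rescanning the genotype columns with a membership-filtered lookup.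
import Mathlib
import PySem

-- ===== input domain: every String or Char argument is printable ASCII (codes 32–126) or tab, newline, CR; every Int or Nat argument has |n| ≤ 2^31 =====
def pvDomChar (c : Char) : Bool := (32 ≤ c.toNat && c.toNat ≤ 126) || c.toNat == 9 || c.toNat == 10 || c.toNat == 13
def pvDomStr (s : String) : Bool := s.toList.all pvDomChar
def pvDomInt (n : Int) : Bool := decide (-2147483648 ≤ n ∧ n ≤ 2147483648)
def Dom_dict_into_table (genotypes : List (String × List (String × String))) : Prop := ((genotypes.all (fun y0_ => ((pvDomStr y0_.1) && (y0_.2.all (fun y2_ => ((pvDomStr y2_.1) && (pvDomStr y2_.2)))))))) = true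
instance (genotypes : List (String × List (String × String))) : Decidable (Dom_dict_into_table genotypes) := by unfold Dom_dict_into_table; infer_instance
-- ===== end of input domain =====

-- B restructures A's transpose (index individuals first, then rescan columns per row); equivalence of the return value, no speed claim.

-- ===== PORT A =====
-- the parameter is a Python dict; its assoc-list representation is normalised by Dict.ofList
def dict_into_table (genotypes : List (String × List (String × String))) : List String :=
  let gdict := PySem.Dict.ofList genotypes
  let header := "\t" ++ PySem.Str.join "\t" gdict.keys
  let lines := [header]
  let individuals : PySem.Dict String (List String) :=
    gdict.items.foldl (fun d rg =>
      let gd := PySem.Dict.ofList rg.2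
      gd.keys.foldl (fun d ind =>
        -- individuals.setdefault(individual, []); individuals[individual].append(genotype[individual])
        -- genotype[individual]: the key is always present (ind iterates gd.keys), so getD never takes its default
        (d.setdefault ind []).insert ind ((d.setdefault ind []).getD ind [] ++ [gd.getD ind ""])) d)
      PySem.Dict.empty
  lines ++ individuals.items.map (fun p => PySem.Str.join "\t" [p.1, PySem.Str.join "\t" p.2])

-- ===== PORT B =====
def dict_into_table_alt (genotypes : List (String × List (String × String))) : List String :=
  let gdict := PySem.Dict.ofList genotypes
  let individuals := PySem.List.dedup (gdict.values.flatMap (fun g => (PySem.Dict.ofList g).keys))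
  let header := "\t" ++ PySem.Str.join "\t" gdict.keys
  header :: individuals.map (fun ind =>
    PySem.Str.join "\t" (ind :: gdict.values.filterMap (fun g => (PySem.Dict.ofList g).get? ind)))

-- ===== PRECONDITION & SPEC =====
def Spec_dict_into_table (genotypes : List (String × List (String × String))) (out : List String) : Prop := out = dict_into_table_alt genotypes
instance (genotypes : List (String × List (String × String))) (out : List String) : Decidable (Spec_dict_into_table genotypes out) := by unfold Spec_dict_into_table; infer_instance

-- ===== CLAIM (what is proved, stated in full; the proofs are below) =====
def Claim_equal_dict_into_table : Prop := ∀ (genotypes : List (String × List (String × String))), Dom_dict_into_table genotypes → Spec_dict_into_table genotypes (dict_into_table genotypes)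

-- ===== LEMMAS AND PROOFS =====

-- setdefault-then-append on one key is a single modify
theorem pv_sd_ins (d : PySem.Dict String (List String)) (k : String) (v : String) :
    (d.setdefault k []).insert k ((d.setdefault k []).getD k [] ++ [v]) = d.modify k [] (· ++ [v]) := by
  by_cases h : d.contains k = true
  · rw [PySem.Dict.setdefault_of_contains _ _ h]; rfl
  · rw [PySem.Dict.setdefault_of_not_contains _ _ (by simpa using h)]
    rw [PySem.Dict.getD_insert_self, PySem.Dict.insert_insert_self]
    show d.insert k [v] = d.insert k (d.getD k [] ++ [v])
    rw [PySem.Dict.getD_of_not_contains _ _ (by simpa using h)]; rfl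

-- A's inner loop over genotype.keys() is a modify-fold over the genotype's items
theorem pv_inner (g : List (String × String)) (d : PySem.Dict String (List String)) :
    (PySem.Dict.ofList g).keys.foldl (fun d ind =>
        (d.setdefault ind []).insert ind ((d.setdefault ind []).getD ind [] ++ [(PySem.Dict.ofList g).getD ind ""])) d
      = (PySem.Dict.ofList g).items.foldl (fun d p => d.modify p.1 [] (· ++ [p.2])) d := by
  show ((PySem.Dict.ofList g).items.map Prod.fst).foldl _ d = _
  rw [List.foldl_map]
  refine PySem.List.foldl_congr_mem' _ _ _ _ ?_
  intro p hp acc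
  rw [pv_sd_ins]
  have hv : (PySem.Dict.ofList g).getD p.1 "" = p.2 :=
    PySem.Dict.getD_of_mem_items _ (by simpa using hp) (PySem.Dict.nodup_keys_ofList g) ""
  rw [hv]

theorem pv_foldl_flatMap {a b c : Type} (l : List a) (h : a → List b) (f : c → b → c) (init : c) :
    (l.flatMap h).foldl f init = l.foldl (fun acc x => (h x).foldl f acc) init := by
  induction l generalizing init with
  | nil => rfl
  | cons x xs ih => simp only [List.flatMap_cons, List.foldl_append, List.foldl_cons, ih]

theorem pv_filterMap_eq_flatMap {a b : Type} (l : List a) (f : a → Option b) :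
    l.filterMap f = l.flatMap (fun x => (f x).toList) := by
  induction l with
  | nil => rfl
  | cons x xs ih => cases hx : f x <;> simp [hx, ih]

-- the filtered-projected items of a nodup-key pair list are the lookup's toList
theorem pv_filter_get (l : List (String × String)) (hl : (l.map Prod.fst).Nodup) (k : String) :
    (l.filter (fun p => p.1 == k)).map Prod.snd = ((PySem.Dict.mk l).get? k).toList := by
  induction l with
  | nil => simp [PySem.Dict.get?]
  | cons a l ih =>
    simp only [List.map_cons, List.nodup_cons] at hl
    rw [PySem.Dict.get?_mk_cons]
    by_cases h : a.1 == k
    · have hk : a.1 = k := by simpa using h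
      have hnil : l.filter (fun p => p.1 == k) = [] := by
        rw [List.filter_eq_nil_iff]
        intro p hp
        simp only [beq_iff_eq]
        intro hpk
        exact hl.1 (List.mem_map.2 ⟨p, hp, by rw [hpk, hk]⟩)
      simp [h, hnil]
    · simp only [List.filter_cons, h, Bool.false_eq_true, if_false]
      rw [ih hl.2]

theorem pv_row (g : List (String × String)) (k : String) :
    ((PySem.Dict.ofList g).items.filter (fun p => p.1 == k)).map Prod.snd
      = ((PySem.Dict.ofList g).get? k).toList := by
  have h := pv_filter_get (PySem.Dict.ofList g).items
    (by simpa [PySem.Dict.keys] using PySem.Dict.nodup_keys_ofList g) k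
  rwa [show PySem.Dict.mk (PySem.Dict.ofList g).items = PySem.Dict.ofList g from rfl] at h

theorem pv_join_collapse (k q : String) (rest : List String) :
    PySem.Str.join "\t" [k, PySem.Str.join "\t" (q :: rest)] = PySem.Str.join "\t" (k :: q :: rest) := by
  unfold PySem.Str.join
  congr 1
  simp [PySem.Chars.join_cons_cons, PySem.Chars.join_singleton]

-- ===== VERDICT (by name: the statement is the Claim_ definition above) =====
theorem dict_into_table_spec : Claim_equal_dict_into_table := by
  intro genotypes _
  show dict_into_table genotypes = dict_into_table_alt genotypes
  unfold dict_into_table dict_into_table_alt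
  set gd := PySem.Dict.ofList genotypes with hgd
  set P : List (String × String) := gd.items.flatMap (fun rg => (PySem.Dict.ofList rg.2).items) with hP
  -- rewrite A's nested loops into a single modify-fold over P
  have hloop : gd.items.foldl (fun d rg =>
        (PySem.Dict.ofList rg.2).keys.foldl (fun d ind =>
          (d.setdefault ind []).insert ind ((d.setdefault ind []).getD ind [] ++ [(PySem.Dict.ofList rg.2).getD ind ""])) d)
        PySem.Dict.empty
      = P.foldl (fun d p => d.modify p.1 [] (· ++ [p.2])) PySem.Dict.empty := by
    rw [hP, pv_foldl_flatMap]
    exact PySem.List.foldl_congr_mem' _ _ _ _ (fun rg _ acc => pv_inner rg.2 acc)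
  simp only [hloop]
  set D := P.foldl (fun d p => d.modify p.1 [] (· ++ [p.2])) PySem.Dict.empty with hD
  have hnodup : D.keys.Nodup := by
    refine PySem.Dict.nodup_keys_foldl_modify_key P Prod.fst [] (fun _ p => (· ++ [p.2])) _ ?_
    simp [PySem.Dict.empty, PySem.Dict.keys]
  have hkeys : D.keys = PySem.Set.ofList (P.map Prod.fst) := by
    rw [hD, PySem.Dict.keys_foldl_modify_key P Prod.fst [] (fun _ p => (· ++ [p.2]))]
    simp [PySem.Dict.empty, PySem.Dict.keys, PySem.Set.update_nil_left]
  have hgetD : ∀ k, D.getD k [] = (P.filter (fun p => p.1 == k)).map Prod.snd := by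
    intro k
    rw [hD, PySem.Dict.getD_foldl_modify_append]
    simp [PySem.Dict.getD_empty]
  -- B's individual list is D's key list
  have hinds : PySem.List.dedup (gd.values.flatMap (fun g => (PySem.Dict.ofList g).keys))
      = PySem.Set.ofList (P.map Prod.fst) := by
    show PySem.List.dedup ((gd.items.map Prod.snd).flatMap fun g => (PySem.Dict.ofList g).items.map Prod.fst) = _
    rw [List.flatMap_map, hP, List.map_flatMap]
    rfl
  -- B's row equals D's stored list
  have hrow : ∀ k, gd.values.filterMap (fun g => (PySem.Dict.ofList g).get? k)
      = (P.filter (fun p => p.1 == k)).map Prod.snd := by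
    intro k
    show (gd.items.map Prod.snd).filterMap (fun g => (PySem.Dict.ofList g).get? k) = _
    rw [List.filterMap_map, hP, List.filter_flatMap, List.map_flatMap,
        pv_filterMap_eq_flatMap]
    refine List.flatMap_congr ?_
    intro rg _
    simpa using (pv_row rg.2 k).symm
  rw [PySem.Dict.items_eq_map_keys D hnodup [], hkeys, List.map_map, List.singleton_append, hinds]
  congr 1
  refine List.map_congr_left ?_
  intro k hk
  have hkP : k ∈ P.map Prod.fst := (PySem.Set.mem_ofList _ _).1 hk
  have hne : (P.filter (fun p => p.1 == k)).map Prod.snd ≠ [] := by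
    simp only [ne_eq, List.map_eq_nil_iff, List.filter_eq_nil_iff, not_forall]
    obtain ⟨p, hp, hpk⟩ := List.mem_map.1 hkP
    exact ⟨p, hp, by simp [hpk]⟩
  simp only [Function.comp_apply, hgetD, hrow k]
  obtain ⟨q, rest, hqr⟩ : ∃ q rest, (P.filter (fun p => p.1 == k)).map Prod.snd = q :: rest := by
    cases hx : (P.filter (fun p => p.1 == k)).map Prod.snd with
    | nil => exact absurd hx hne
    | cons q rest => exact ⟨q, rest, rfl⟩
  rw [hqr, pv_join_collapse]
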